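-- pv_equiv track=rewrite | github.com/pypi-data/pypi-mirror-402 | packages/elspais/elspais-0.11.2-py3-none-any.whl/elspais/trace_view/review/position.py | find_line_in_text
-- ===== SOURCE A (Python) =====
-- from typing import Any, Dict, List, Optional, Tuple
--
-- def find_line_in_text(text: str, line_number: int) -> Optional[Tuple[int, int]]:
--     """
--     Find character range for a specific line in text.
--
--     Args:
--         text: The text to search in
--         line_number: 1-based line number to find
--
--     Returns:
--         Tuple of (start_offset, end_offset) for the line, or None if line doesn't exist.
--         end_offset points to the character after the line content (before newline or EOF).
--     """
--     if not text or line_number < 1: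
--         return None
--
--     lines = text.split("\n")
--
--     if line_number > len(lines):
--         return None
--
--     # Calculate start offset by summing lengths of previous lines + newlines
--     start_offset = 0
--     for i in range(line_number - 1):
--         start_offset += len(lines[i]) + 1  # +1 for newline
--
--     # End offset is start + length of this line
--     end_offset = start_offset + len(lines[line_number - 1])
--
--     return (start_offset, end_offset)
-- ===== SOURCE B (Python) =====
-- def find_line_in_text(text, line_number):
--     """Single left-to-right scan tracking the current line's start offset;
--     no list of lines is ever built."""
--     if not text or line_number < 1:
--         return None
--     line = 1
--     start = 0
--     for i, ch in enumerate(text):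
--         if ch == "\n":
--             if line == line_number:
--                 return (start, i)
--             line += 1
--             start = i + 1
--     if line == line_number:
--         return (start, len(text))
--     return None
-- ===== Notes on version B (the rewrite author's own statement) =====
-- stated objective: alternative
-- what changed: B replaces split-into-a-list-of-lines plus a prefix-sum loop over previous line lengths by a single left-to-right character scan that tracks the current line number and the current line-start offset and returns early, never materializing the list of lines.
import Mathlib
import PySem

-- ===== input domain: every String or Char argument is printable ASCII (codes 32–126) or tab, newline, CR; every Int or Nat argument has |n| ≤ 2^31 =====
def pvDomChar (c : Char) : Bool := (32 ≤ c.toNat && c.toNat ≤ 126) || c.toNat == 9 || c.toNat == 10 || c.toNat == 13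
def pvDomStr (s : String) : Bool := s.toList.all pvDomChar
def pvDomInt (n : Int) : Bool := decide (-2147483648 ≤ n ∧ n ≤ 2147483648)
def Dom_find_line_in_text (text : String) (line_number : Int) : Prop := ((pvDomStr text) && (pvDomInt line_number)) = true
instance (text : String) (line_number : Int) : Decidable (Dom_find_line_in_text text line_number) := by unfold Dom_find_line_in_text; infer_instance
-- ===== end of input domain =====

-- B: one left-to-right scan tracking the current line's start offset (early return), instead of A's split into a list of lines plus a prefix-sum loop; same return value, alternative structure.


-- ===== PORT A =====
-- text.split("\n") is PySem.Chars.splitOn on the code points (exact for a non-empty separator).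
def find_line_in_text (text : String) (line_number : Int) : Option (Int × Int) :=
  if text = "" ∨ line_number < 1 then none
  else
    let lines := PySem.Chars.splitOn text.toList ['\n']
    if line_number > (lines.length : Int) then none
    else
      let start_offset :=
        (PySem.List.pyRange 0 (line_number - 1)).foldl
          (fun acc i => acc + ((PySem.List.pyGetD lines i []).length : Int) + 1) 0
      let end_offset := start_offset + ((PySem.List.pyGetD lines (line_number - 1) []).length : Int)
      some (start_offset, end_offset)

-- ===== PORT B =====
-- the 'for i, ch in enumerate(text)' loop of Source B with its early returns
def altLoop (line_number : Int) : List Char → Int → Int → Int → Option (Int × Int)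
  | [], i, line, start => if line = line_number then some (start, i) else none
  | c :: rest, i, line, start =>
    if c = '\n' then
      if line = line_number then some (start, i)
      else altLoop line_number rest (i + 1) (line + 1) (i + 1)
    else altLoop line_number rest (i + 1) line start

def find_line_in_text_alt (text : String) (line_number : Int) : Option (Int × Int) :=
  if text = "" ∨ line_number < 1 then none
  else altLoop line_number text.toList 0 1 0

-- ===== PRECONDITION & SPEC =====
def Spec_find_line_in_text (text : String) (line_number : Int) (out : Option (Int × Int)) : Prop := out = find_line_in_text_alt text line_number
instance (text : String) (line_number : Int) (out : Option (Int × Int)) : Decidable (Spec_find_line_in_text text line_number out) := by unfold Spec_find_line_in_text; infer_instance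

-- ===== CLAIM (what is proved, stated in full; the proofs are below) =====
def Claim_equal_find_line_in_text : Prop := ∀ (text : String) (line_number : Int), Dom_find_line_in_text text line_number → Spec_find_line_in_text text line_number (find_line_in_text text line_number)

-- ===== LEMMAS AND PROOFS =====

-- structural model of text.split("\n")
def splitNl : List Char → List (List Char)
  | [] => [[]]
  | c :: rest =>
    if c = '\n' then [] :: splitNl rest
    else (c :: (splitNl rest).headI) :: (splitNl rest).tail

-- sum of (len + 1) over the first k pieces
def lineSum : List (List Char) → Nat → Int
  | _, 0 => 0
  | [], _ + 1 => 0
  | h :: t, k + 1 => ((h.length : Int) + 1) + lineSum t k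

theorem splitNl_ne_nil (cs : List Char) : splitNl cs ≠ [] := by
  cases cs with
  | nil => simp [splitNl]
  | cons c rest => by_cases hc : c = '\n' <;> simp [splitNl, hc]

theorem headI_cons_tail {α : Type} [Inhabited α] (L : List α) (h : L ≠ []) :
    L.headI :: L.tail = L := by
  cases L with
  | nil => exact absurd rfl h
  | cons a t => rfl

theorem go_spec (l : List Char) : ∀ (fuel : Nat) (cur : List Char) (acc : List (List Char)),
    l.length < fuel →
    PySem.Chars.splitOn.go ['\n'] fuel l cur acc
      = acc.reverse ++ (cur.reverse ++ (splitNl l).headI) :: (splitNl l).tail := by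
  induction l with
  | nil =>
    intro fuel cur acc h
    cases fuel with
    | zero => omega
    | succ f => rw [PySem.Chars.splitOn.go.eq_def]; simp [splitNl]
  | cons c rest ih =>
    intro fuel cur acc h
    cases fuel with
    | zero => simp at h
    | succ f =>
      rw [PySem.Chars.splitOn.go.eq_def]
      by_cases hc : c = '\n'
      · subst hc
        have hpre : (['\n'] : List Char).isPrefixOf ('\n' :: rest) = true := by
          simp [List.isPrefixOf]
        simp only [hpre, if_pos]
        show PySem.Chars.splitOn.go ['\n'] f rest [] (cur.reverse :: acc) = _
        rw [ih f [] ((cur.reverse :: acc)) (by simpa using h)]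
        simp [splitNl, headI_cons_tail _ (splitNl_ne_nil rest)]
      · have hpre : (['\n'] : List Char).isPrefixOf (c :: rest) = false := by
          simp [List.isPrefixOf]; exact fun hh => hc hh.symm
        simp only [hpre, Bool.false_eq_true, if_neg, not_false_iff]
        rw [ih f (c :: cur) acc (by simpa using h)]
        simp [splitNl, hc]
  
theorem splitOn_eq (cs : List Char) : PySem.Chars.splitOn cs ['\n'] = splitNl cs := by
  unfold PySem.Chars.splitOn
  rw [go_spec cs (cs.length + 1) [] [] (by omega)]
  simpa using headI_cons_tail _ (splitNl_ne_nil cs)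

theorem pyRange_self_nil (a : Int) : PySem.List.pyRange a a = [] := by
  have h := PySem.List.pyRange_one_append a a a le_rfl le_rfl
  have h2 := congrArg List.length h
  rw [List.length_append] at h2
  have h3 : (PySem.List.pyRange a a).length = 0 := by omega
  exact List.eq_nil_of_length_eq_zero h3

theorem lineSum_succ : ∀ (L : List (List Char)) (k : Nat), k < L.length →
    lineSum L (k + 1) = lineSum L k + ((L.getD k []).length : Int) + 1 := by
  intro L
  induction L with
  | nil => intro k h; simp at h
  | cons hd t ih =>
    intro k h
    cases k with
    | zero => simp [lineSum]
    | succ k =>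
      have := ih k (by simpa using h)
      simp [lineSum, this]; ring

theorem foldl_range_lineSum (L : List (List Char)) :
    ∀ (k : Nat) (b : Int), k ≤ L.length →
    (PySem.List.pyRange 0 (k : Int)).foldl
      (fun acc i => acc + ((PySem.List.pyGetD L i []).length : Int) + 1) b
    = b + lineSum L k := by
  intro k
  induction k with
  | zero => intro b _; simp [lineSum]
  | succ k ih =>
    intro b h
    have hsplit : PySem.List.pyRange 0 ((k + 1 : Nat) : Int)
        = PySem.List.pyRange 0 (k : Int) ++ PySem.List.pyRange (k : Int) ((k + 1 : Nat) : Int) := by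
      exact PySem.List.pyRange_one_append 0 k ((k + 1 : Nat) : Int) (by positivity) (by push_cast; omega)
    have hone : PySem.List.pyRange (k : Int) ((k + 1 : Nat) : Int) = [(k : Int)] := by
      rw [PySem.List.pyRange_one_cons (by push_cast; omega)]
      have : ((k : Int) + 1) = ((k + 1 : Nat) : Int) := by push_cast; ring
      rw [this, pyRange_self_nil]
    rw [hsplit, hone, List.foldl_append]
    rw [ih b (by omega)]
    simp only [List.foldl_cons, List.foldl_nil, PySem.List.pyGetD_natCast]
    rw [lineSum_succ L k (by omega)]
    ring

theorem altLoop_spec : ∀ (cs : List Char) (i start line ln : Int), line ≤ ln →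
    altLoop ln cs i line start =
      (if (ln - line).toNat < (splitNl cs).length then
        (if (ln - line).toNat = 0 then
          some (start, i + (((splitNl cs).getD 0 []).length : Int))
         else
          some (i + lineSum (splitNl cs) (ln - line).toNat,
                i + lineSum (splitNl cs) (ln - line).toNat
                  + (((splitNl cs).getD (ln - line).toNat []).length : Int)))
       else none) := by
  intro cs
  induction cs with
  | nil =>
    intro i start line ln h
    by_cases hl : line = ln
    · subst hl
      simp [altLoop, splitNl]
    · have hx : ¬ ((ln - line).toNat < (splitNl ([] : List Char)).length) := by
        simp [splitNl]; omega
      simp only [altLoop, if_neg hl, hx, if_false]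
  | cons c rest ih =>
    intro i start line ln h
    by_cases hc : c = '\n'
    · subst hc
      by_cases hl : line = ln
      · subst hl
        simp [altLoop, splitNl]
      · have hlt : line + 1 ≤ ln := by omega
        have hstep : altLoop ln ('\n' :: rest) i line start
            = altLoop ln rest (i + 1) (line + 1) (i + 1) := by
          simp [altLoop, hl]
        rw [hstep, ih (i + 1) (i + 1) (line + 1) ln hlt]
        rw [show splitNl ('\n' :: rest) = [] :: splitNl rest from by simp [splitNl]]
        have hm : (ln - line).toNat = (ln - (line + 1)).toNat + 1 := by omega
        rw [hm]
        simp only [List.length_cons, Nat.add_lt_add_iff_right, Nat.succ_ne_zero,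
          if_false, List.getD_cons_succ]
        split_ifs with h1 h2
        · rw [h2]
          simp [lineSum]
        · obtain ⟨m'', hm''⟩ : ∃ m'', (ln - (line + 1)).toNat = m'' + 1 :=
            ⟨(ln - (line + 1)).toNat - 1, by omega⟩
          rw [hm'']
          simp [lineSum]
          omega
        · rfl
    · have hstep : altLoop ln (c :: rest) i line start
          = altLoop ln rest (i + 1) line start := by
        simp [altLoop, hc]
      rw [hstep, ih (i + 1) start line ln h]
      rcases hL : splitNl rest with _ | ⟨h', t⟩
      · exact absurd hL (splitNl_ne_nil rest)
      · rw [show splitNl (c :: rest) = (c :: h') :: t from by simp [splitNl, hc, hL]]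
        simp only [List.length_cons]
        split_ifs with h1 h2
        · simp
          omega
        · obtain ⟨m'', hm''⟩ : ∃ m'', (ln - line).toNat = m'' + 1 :=
            ⟨(ln - line).toNat - 1, by omega⟩
          rw [hm'']
          simp [lineSum]
          omega
        · rfl

theorem find_line_in_text_eq_body (text : String) (ln : Int) :
    find_line_in_text text ln = find_line_in_text_alt text ln := by
  unfold find_line_in_text find_line_in_text_alt
  by_cases h0 : text = "" ∨ ln < 1
  · simp [h0]
  · simp only [if_neg h0]
    rw [not_or] at h0
    obtain ⟨hne, hln0⟩ := h0
    have hln : 1 ≤ ln := by omega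
    rw [splitOn_eq]
    have hLne := splitNl_ne_nil text.toList
    have hL1 : 1 ≤ (splitNl text.toList).length := by
      cases hL : splitNl text.toList with
      | nil => exact absurd hL hLne
      | cons a t => simp
    rw [altLoop_spec text.toList 0 0 1 ln (by omega)]
    by_cases hgt : ln > ((splitNl text.toList).length : Int)
    · rw [if_pos hgt]
      have hnk : ¬ ((ln - 1).toNat < (splitNl text.toList).length) := by omega
      rw [if_neg hnk]
    · rw [if_neg hgt]
      have hk : (ln - 1).toNat < (splitNl text.toList).length := by omega
      rw [if_pos hk]
      have hk' : ln - 1 = (((ln - 1).toNat : Nat) : Int) := by omega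
      rw [hk', foldl_range_lineSum _ _ 0 (by omega), PySem.List.pyGetD_natCast]
      simp only [Int.toNat_natCast]
      by_cases hk0 : (ln - 1).toNat = 0
      · rw [if_pos hk0, hk0]
        simp [lineSum]
      · rw [if_neg hk0]

-- ===== VERDICT (by name: the statement is the Claim_ definition above) =====
theorem find_line_in_text_spec : Claim_equal_find_line_in_text := by
  intro text line_number _
  unfold Spec_find_line_in_text
  exact find_line_in_text_eq_body text line_number
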